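-- pv_equiv track=rewrite | github.com/StephenA0/Hearts-Player | make_decision.py | win_duel
-- ===== SOURCE A (Python) =====
-- def win_duel(ranks, remaining):
--     opp_ranks = []
--     for i in range(1, remaining + len(ranks) + 1):
--         if i not in ranks:
--             opp_ranks.append(i)
--
--     for i in range(1, min(len(ranks), len(opp_ranks)) + 1):
--         if ranks[-i] < opp_ranks[-i]:
--             return False
--     return True
-- ===== SOURCE B (Python) =====
-- def win_duel(ranks, remaining):
--     skip = set(ranks)
--     j = remaining + len(ranks)
--     for r in reversed(ranks):
--         while j >= 1 and j in skip:
--             j -= 1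
--         if j < 1:
--             break
--         if r < j:
--             return False
--         j -= 1
--     return True
-- ===== Notes on version B (the rewrite author's own statement) =====
-- stated objective: faster
-- what changed: Instead of materialising the opponent's complement list (with an O(n) list-membership test per candidate) and re-indexing both lists from the back, B streams the complement top-down with a descending cursor over a set of the player's ranks and merges it against reversed(ranks) in a single two-pointer pass.
import Mathlib
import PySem

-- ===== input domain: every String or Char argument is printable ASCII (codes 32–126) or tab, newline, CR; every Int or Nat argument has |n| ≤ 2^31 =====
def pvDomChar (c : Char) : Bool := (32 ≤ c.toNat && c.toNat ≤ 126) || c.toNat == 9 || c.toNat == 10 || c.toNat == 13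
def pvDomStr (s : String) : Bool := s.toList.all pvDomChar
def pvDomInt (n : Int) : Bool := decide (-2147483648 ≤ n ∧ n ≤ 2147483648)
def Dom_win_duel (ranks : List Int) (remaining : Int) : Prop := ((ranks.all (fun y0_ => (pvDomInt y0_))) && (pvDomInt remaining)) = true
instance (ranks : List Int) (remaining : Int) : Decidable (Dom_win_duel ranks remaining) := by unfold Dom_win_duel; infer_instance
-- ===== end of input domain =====

-- B replaces A's materialised complement list and backwards indexing by a single
-- top-down two-pointer merge over reversed(ranks) and a descending cursor (objective: alternative).

-- ===== PORT A =====
-- the second 'for' loop of A, over the (Int) index list; the negative index -i is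
-- always in range (1 ≤ i ≤ min len, proved in the lemmas), so pyGetD's default is never used
def winDuelLoopA (ranks opp : List Int) : List Int → Bool
  | [] => true
  | i :: rest =>
    if PySem.List.pyGetD ranks (-i) 0 < PySem.List.pyGetD opp (-i) 0 then false
    else winDuelLoopA ranks opp rest

-- opp_ranks is built by repeated append, as in A; an Array push models Python's O(1) list append
def win_duel (ranks : List Int) (remaining : Int) : Bool :=
  let opp := ((PySem.List.pyRange 1 (remaining + PySem.List.len ranks + 1) 1).foldl
      (fun acc i => if i ∈ ranks then acc else acc.push i) (#[] : Array Int)).toList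
  winDuelLoopA ranks opp
    (PySem.List.pyRange 1 (min (PySem.List.len ranks) (PySem.List.len opp) + 1) 1)

-- ===== PORT B =====
-- the 'while j >= 1 and j in skip: j -= 1' loop
def winDuelDescend (skip : PySem.Set Int) (j : Int) : Int :=
  if h : 1 ≤ j ∧ PySem.Set.contains skip j then winDuelDescend skip (j - 1) else j
termination_by j.toNat
decreasing_by omega

-- the 'for r in reversed(ranks)' loop with its break / early returns
def winDuelLoopB (skip : PySem.Set Int) : List Int → Int → Bool
  | [], _ => true
  | r :: rest, j =>
    let j' := winDuelDescend skip j
    if j' < 1 then true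
    else if r < j' then false
    else winDuelLoopB skip rest (j' - 1)

def win_duel_alt (ranks : List Int) (remaining : Int) : Bool :=
  let skip := PySem.Set.ofList ranks
  winDuelLoopB skip ranks.reverse (remaining + PySem.List.len ranks)

-- ===== PRECONDITION & SPEC =====
def Spec_win_duel (ranks : List Int) (remaining : Int) (out : Bool) : Prop := out = win_duel_alt ranks remaining
instance (ranks : List Int) (remaining : Int) (out : Bool) : Decidable (Spec_win_duel ranks remaining out) := by unfold Spec_win_duel; infer_instance

-- ===== CLAIM (what is proved, stated in full; the proofs are below) =====
def Claim_equal_win_duel : Prop := ∀ (ranks : List Int) (remaining : Int), Dom_win_duel ranks remaining → Spec_win_duel ranks remaining (win_duel ranks remaining)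

-- ===== LEMMAS AND PROOFS =====

-- common reference: compare two lists position by position, truncating at the shorter
def winDuelChk : List Int → List Int → Bool
  | [], _ => true
  | _ :: _, [] => true
  | r :: rs, o :: os => if r < o then false else winDuelChk rs os

theorem winDuelChk_nil_right (as : List Int) : winDuelChk as [] = true := by
  cases as <;> rfl

-- the complement of `ranks` inside [1..j], listed top-down
def winDuelCompRev (ranks : List Int) (j : Int) : List Int :=
  if h : 1 ≤ j then
    (if j ∈ ranks then winDuelCompRev ranks (j - 1) else j :: winDuelCompRev ranks (j - 1))
  else []
termination_by j.toNat
decreasing_by all_goals omega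

theorem winDuelDescend_compRev (ranks : List Int) (j : Int) :
    winDuelCompRev ranks (winDuelDescend (PySem.Set.ofList ranks) j) = winDuelCompRev ranks j := by
  fun_induction winDuelDescend (PySem.Set.ofList ranks) j with
  | case1 j h ih =>
    rw [ih]
    have hj : j ∈ ranks := by
      have := (PySem.Set.contains_iff (PySem.Set.ofList ranks) j).mp h.2
      exact (PySem.Set.mem_ofList ranks j).mp this
    conv_rhs => rw [winDuelCompRev]
    rw [dif_pos h.1, if_pos hj]
  | case2 j h => rfl

theorem winDuelDescend_spec (ranks : List Int) (j : Int) :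
    winDuelDescend (PySem.Set.ofList ranks) j < 1 ∨
      (1 ≤ winDuelDescend (PySem.Set.ofList ranks) j ∧
        winDuelDescend (PySem.Set.ofList ranks) j ∉ ranks) := by
  fun_induction winDuelDescend (PySem.Set.ofList ranks) j with
  | case1 j h ih => exact ih
  | case2 j h =>
    by_cases h1 : 1 ≤ j
    · right
      refine ⟨h1, fun hmem => h ⟨h1, ?_⟩⟩
      exact (PySem.Set.contains_iff _ _).mpr ((PySem.Set.mem_ofList ranks j).mpr hmem)
    · left; omega

theorem winDuelCompRev_of_lt (ranks : List Int) (j : Int) (h : j < 1) :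
    winDuelCompRev ranks j = [] := by
  rw [winDuelCompRev, dif_neg (by omega)]

theorem winDuelCompRev_of_notmem (ranks : List Int) (j : Int) (h1 : 1 ≤ j) (h2 : j ∉ ranks) :
    winDuelCompRev ranks j = j :: winDuelCompRev ranks (j - 1) := by
  rw [winDuelCompRev, dif_pos h1, if_neg h2]

theorem winDuelLoopB_eq_chk (ranks : List Int) (rs : List Int) (j : Int) :
    winDuelLoopB (PySem.Set.ofList ranks) rs j = winDuelChk rs (winDuelCompRev ranks j) := by
  induction rs generalizing j with
  | nil => simp [winDuelLoopB, winDuelChk]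
  | cons r rest ih =>
    rw [winDuelLoopB]
    rw [← winDuelDescend_compRev ranks j]
    rcases winDuelDescend_spec ranks j with hlt | ⟨h1, hnm⟩
    · rw [if_pos hlt, winDuelCompRev_of_lt ranks _ hlt, winDuelChk_nil_right]
    · rw [if_neg (by omega), winDuelCompRev_of_notmem ranks _ h1 hnm, winDuelChk]
      by_cases hr : r < winDuelDescend (PySem.Set.ofList ranks) j
      · rw [if_pos hr, if_pos hr]
      · rw [if_neg hr, if_neg hr, ih]

theorem winDuelCompRev_eq_filter (ranks : List Int) (j : Int) :
    winDuelCompRev ranks j =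
      ((PySem.List.pyRange 1 (j + 1) 1).filter (fun x => decide (x ∉ ranks))).reverse := by
  fun_induction winDuelCompRev ranks j with
  | case1 j h1 hmem ih =>
    rw [ih, PySem.List.pyRange_one_succ_right h1]
    simp [hmem]
  | case2 j h1 hmem ih =>
    rw [ih, PySem.List.pyRange_one_succ_right h1]
    simp [hmem]
  | case3 j h1 =>
    rw [PySem.List.pyRange_one_eq_nil (by omega)]
    rfl

theorem winDuelLoopA_eq_chk (as bs : List Int) (n : Nat) :
    winDuelLoopA as bs
        (PySem.List.pyRange ((n : Int) + 1) ((min as.length bs.length : Int) + 1) 1) =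
      winDuelChk (as.reverse.drop n) (bs.reverse.drop n) := by
  by_cases hn : n < min as.length bs.length
  · rw [PySem.List.pyRange_one_cons (by omega)]
    rw [winDuelLoopA]
    have hcast : (-((n : Int) + 1)) = -(((n + 1 : Nat)) : Int) := by push_cast; ring
    have ha : n + 1 ≤ as.length := by omega
    have hb : n + 1 ≤ bs.length := by omega
    rw [hcast, PySem.List.pyGetD_neg_natCast as (n + 1) 0 (by omega) ha,
        PySem.List.pyGetD_neg_natCast bs (n + 1) 0 (by omega) hb]
    rw [List.drop_eq_getElem_cons (by simp; omega), List.drop_eq_getElem_cons (l := bs.reverse) (by simp; omega)]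
    rw [winDuelChk]
    have hga : as.reverse[n]'(by simp; omega) = as[as.length - (n + 1)]'(by omega) := by
      rw [List.getElem_reverse]
      congr 1
      omega
    have hgb : bs.reverse[n]'(by simp; omega) = bs[bs.length - (n + 1)]'(by omega) := by
      rw [List.getElem_reverse]
      congr 1
      omega
    rw [hga, hgb]
    have := winDuelLoopA_eq_chk as bs (n + 1)
    push_cast at this ⊢
    rw [show (n : Int) + 1 + 1 = (n : Int) + 2 by ring] at this ⊢
    rw [this]
  · rw [PySem.List.pyRange_one_eq_nil (by omega)]
    rw [winDuelLoopA]
    have hle : as.length ≤ n ∨ bs.length ≤ n := by omega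
    rcases hle with hle | hle
    · rw [List.drop_eq_nil_of_le (by simpa using hle)]
      rfl
    · rw [List.drop_eq_nil_of_le (as := bs.reverse) (by simpa using hle), winDuelChk_nil_right]
termination_by min as.length bs.length - n

-- ===== VERDICT (by name: the statement is the Claim_ definition above) =====
theorem win_duel_spec : Claim_equal_win_duel := by
  intro ranks remaining _
  unfold Spec_win_duel win_duel win_duel_alt
  have hfold : ∀ (l : List Int) (arr : Array Int),
      (l.foldl (fun acc i => if i ∈ ranks then acc else acc.push i) arr).toList
        = arr.toList ++ l.filter (fun x => decide (x ∉ ranks)) := by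
    intro l
    induction l with
    | nil => intro arr; simp
    | cons x xs ih =>
      intro arr
      by_cases h : x ∈ ranks <;> simp [h, ih]
  simp only [hfold, List.nil_append, PySem.List.len_eq]
  rw [winDuelLoopB_eq_chk, winDuelCompRev_eq_filter]
  have := winDuelLoopA_eq_chk ranks
      ((PySem.List.pyRange 1 (remaining + (ranks.length : Int) + 1) 1).filter (fun x => decide (x ∉ ranks))) 0
  simp only [Nat.cast_zero, zero_add, List.drop_zero] at this
  exact this
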